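-- pv_equiv track=rewrite | github.com/ColinTr/ClassificationForRegression | src/utils/logging_util.py | find_index_in_list
-- ===== SOURCE A (Python) =====
-- def find_index_in_list(split_path_list, element_list):
--     """
--     Returns the index of any element of a list inside another list.
--     :param split_path_list: The list where we want to find an item.
--     :param element_list: The list of items to test.
--     :return: Index of the element or None if not found.
--     """
--     index = None
--     for element in element_list:
--         try:
--             index = split_path_list.index(element)
--         except ValueError:
--             pass
--     return index
-- ===== SOURCE B (Python) =====
-- def find_index_in_list(split_path_list, element_list):
--     for element in reversed(element_list):
--         try:
--             return split_path_list.index(element)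
--         except ValueError:
--             pass
--     return None
-- ===== Notes on version B (the rewrite author's own statement) =====
-- stated objective: simpler
-- what changed: Replaces the full scan that keeps overwriting an accumulator with a reverse traversal of element_list that returns immediately on the first element found, removing the accumulator and all lookups after the answer is known.
import Mathlib
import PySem

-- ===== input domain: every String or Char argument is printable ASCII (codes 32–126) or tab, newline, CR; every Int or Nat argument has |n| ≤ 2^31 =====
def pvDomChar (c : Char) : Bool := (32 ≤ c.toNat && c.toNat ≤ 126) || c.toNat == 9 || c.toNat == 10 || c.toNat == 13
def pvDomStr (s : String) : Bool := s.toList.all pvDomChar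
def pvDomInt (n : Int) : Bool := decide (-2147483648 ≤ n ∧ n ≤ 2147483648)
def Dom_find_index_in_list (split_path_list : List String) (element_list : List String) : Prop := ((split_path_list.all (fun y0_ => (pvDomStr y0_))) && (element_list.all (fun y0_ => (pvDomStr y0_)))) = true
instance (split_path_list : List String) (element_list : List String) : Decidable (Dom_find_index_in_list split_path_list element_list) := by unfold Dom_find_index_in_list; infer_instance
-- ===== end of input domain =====

-- B replaces A's overwrite-accumulator scan with an early-exit reverse traversal (simpler decomposition, same results).


-- ===== PORT A =====
-- for element in element_list: try: index = split_path_list.index(element) except ValueError: pass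
def find_index_in_list (split_path_list : List String) (element_list : List String) : Option Int :=
  element_list.foldl
    (fun index element =>
      match PySem.List.index? split_path_list element with
      | some i => some (i : Int)   -- index = split_path_list.index(element)
      | none => index)             -- except ValueError: pass
    none

-- ===== PORT B =====
-- for element in reversed(element_list): try: return split_path_list.index(element) except ValueError: pass
def find_index_in_list_alt_go (split_path_list : List String) : List String → Option Int
  | [] => none                     -- return None
  | element :: rest =>
      match PySem.List.index? split_path_list element with
      | some i => some (i : Int)   -- return split_path_list.index(element)
      | none => find_index_in_list_alt_go split_path_list rest

def find_index_in_list_alt (split_path_list : List String) (element_list : List String) : Option Int :=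
  find_index_in_list_alt_go split_path_list element_list.reverse

-- ===== PRECONDITION & SPEC =====
def Spec_find_index_in_list (split_path_list : List String) (element_list : List String) (out : Option Int) : Prop := out = find_index_in_list_alt split_path_list element_list
instance (split_path_list : List String) (element_list : List String) (out : Option Int) : Decidable (Spec_find_index_in_list split_path_list element_list out) := by unfold Spec_find_index_in_list; infer_instance

-- ===== CLAIM (what is proved, stated in full; the proofs are below) =====
def Claim_equal_find_index_in_list : Prop := ∀ (split_path_list : List String) (element_list : List String), Dom_find_index_in_list split_path_list element_list → Spec_find_index_in_list split_path_list element_list (find_index_in_list split_path_list element_list)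

-- ===== LEMMAS AND PROOFS =====
theorem go_append (spl : List String) (l t : List String) :
    find_index_in_list_alt_go spl (l ++ t)
      = (find_index_in_list_alt_go spl l).orElse (fun _ => find_index_in_list_alt_go spl t) := by
  induction l with
  | nil => simp [find_index_in_list_alt_go, Option.orElse]
  | cons x xs ih =>
      simp only [List.cons_append, find_index_in_list_alt_go]
      cases PySem.List.index? spl x <;> simp [Option.orElse, ih]

theorem foldl_eq_go_reverse (spl : List String) (xs : List String) (acc : Option Int) :
    xs.foldl
      (fun index element =>
        match PySem.List.index? spl element with
        | some i => some (i : Int)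
        | none => index) acc
      = (find_index_in_list_alt_go spl xs.reverse).orElse (fun _ => acc) := by
  induction xs generalizing acc with
  | nil => simp [find_index_in_list_alt_go, Option.orElse]
  | cons x xs ih =>
      simp only [List.foldl_cons, List.reverse_cons, go_append, ih]
      simp only [PySem.List.index?_eq_idxOf?]
      cases h : List.idxOf? x spl <;>
        cases hg : find_index_in_list_alt_go spl xs.reverse <;>
          simp [find_index_in_list_alt_go, Option.orElse, h]

-- ===== VERDICT (by name: the statement is the Claim_ definition above) =====
theorem find_index_in_list_spec : Claim_equal_find_index_in_list := by
  intro spl el _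
  unfold Spec_find_index_in_list find_index_in_list find_index_in_list_alt
  rw [foldl_eq_go_reverse]
  cases find_index_in_list_alt_go spl el.reverse <;> simp [Option.orElse]
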